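-- pv_equiv track=rewrite | github.com/FNA2003/grupo1-tp1-v1 | lexer/AFDs.py | afd_parentesis_final
-- ===== SOURCE A (Python) =====
-- def afd_parentesis_final(cadena):
--     """El estado aceptado es 1"""
--     estados_sin_trampa = [0, 1]
--     estados_aceptados = [1]
--     estados_no_aceptados = [0]
--     estado_trampa = 't'
--     estado = 0
--     caracteres = [')']
--     delta = {
--     0: {')': 1},
--     1: {')': 't'},
--     't': {')': 't'}
--     }
--
--     for caracter in cadena:
--         if (estado in estados_sin_trampa) and (caracter in caracteres):
--             estado = delta[estado][caracter]
--         elif (estado == 't') or not(caracter in caracteres):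
--             estado = 't'
--             break
--
--     if estado in estados_aceptados:
--         estado_final = 'aceptado'
--     elif estado in estados_no_aceptados:
--         estado_final = 'no aceptado'
--     elif estado == estado_trampa:
--         estado_final = 'trampa'
--
--     return estado_final
-- ===== SOURCE B (Python) =====
-- import itertools
--
-- def afd_parentesis_final(cadena):
--     """El estado aceptado es 1"""
--     head = list(itertools.islice(cadena, 2))
--     if head == [')']:
--         return 'aceptado'
--     if head == []:
--         return 'no aceptado'
--     return 'trampa'
-- ===== Notes on version B (the rewrite author's own statement) =====
-- stated objective: simpler
-- what changed: Replaced the DFA state table and transition loop by a direct check of the first two characters (islice keeps A's early exit): a single closing parenthesis is accepted, the empty string is not accepted, anything else is trap.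
import Mathlib
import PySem

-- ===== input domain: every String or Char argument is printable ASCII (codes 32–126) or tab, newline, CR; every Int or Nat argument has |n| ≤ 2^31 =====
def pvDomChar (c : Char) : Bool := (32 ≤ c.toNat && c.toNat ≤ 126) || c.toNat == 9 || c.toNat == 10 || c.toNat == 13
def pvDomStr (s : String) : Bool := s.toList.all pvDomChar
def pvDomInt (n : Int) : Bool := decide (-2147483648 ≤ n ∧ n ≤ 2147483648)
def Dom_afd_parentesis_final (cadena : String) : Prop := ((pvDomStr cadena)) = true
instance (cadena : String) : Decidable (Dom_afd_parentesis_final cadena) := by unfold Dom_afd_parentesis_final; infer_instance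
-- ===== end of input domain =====

-- B replaces A's DFA state table and transition loop by a direct check of the first two characters.
-- ===== PORT A =====
-- Python state values 0, 1, 't' of A's DFA.
inductive AfdSt where
  | s0 | s1 | t
deriving DecidableEq, Repr

-- delta[estado][caracter] for caracter = ')' (the only key present)
def afdDelta : AfdSt → AfdSt
  | AfdSt.s0 => AfdSt.s1
  | AfdSt.s1 => AfdSt.t
  | AfdSt.t  => AfdSt.t

-- the for-loop of A, with its break (returning the state reached)
def afdLoop : AfdSt → List Char → AfdSt
  | estado, [] => estado
  | estado, caracter :: rest =>
    if (estado = AfdSt.s0 ∨ estado = AfdSt.s1) ∧ caracter = ')' then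
      afdLoop (afdDelta estado) rest
    else if estado = AfdSt.t ∨ caracter ≠ ')' then
      AfdSt.t  -- estado = 't'; break
    else
      afdLoop estado rest  -- unreachable in A, kept for literality

def afd_parentesis_final (cadena : String) : String :=
  let estado := afdLoop AfdSt.s0 cadena.toList
  if estado = AfdSt.s1 then "aceptado"
  else if estado = AfdSt.s0 then "no aceptado"
  else "trampa"

-- ===== PORT B =====
def afd_parentesis_final_alt (cadena : String) : String :=
  let head := cadena.toList.take 2
  if head = [')'] then "aceptado"
  else if head = [] then "no aceptado"
  else "trampa"

-- ===== PRECONDITION & SPEC =====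
def Spec_afd_parentesis_final (cadena : String) (out : String) : Prop := out = afd_parentesis_final_alt cadena
instance (cadena : String) (out : String) : Decidable (Spec_afd_parentesis_final cadena out) := by unfold Spec_afd_parentesis_final; infer_instance

-- ===== CLAIM =====
def Claim_equal_afd_parentesis_final : Prop := ∀ (cadena : String), Dom_afd_parentesis_final cadena → Spec_afd_parentesis_final cadena (afd_parentesis_final cadena)

-- ===== LEMMAS AND PROOFS =====
theorem afdLoop_t (l : List Char) : afdLoop AfdSt.t l = AfdSt.t := by
  cases l with
  | nil => rfl
  | cons c rest => simp [afdLoop]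

theorem afd_eq (cadena : String) :
    afd_parentesis_final cadena = afd_parentesis_final_alt cadena := by
  unfold afd_parentesis_final afd_parentesis_final_alt
  cases h : cadena.toList with
  | nil => rfl
  | cons c rest =>
    by_cases hc : c = ')'
    · subst hc
      cases rest with
      | nil => rfl
      | cons d rest' =>
        by_cases hd : d = ')'
        · subst hd; simp [afdLoop, afdDelta, afdLoop_t]
        · simp [afdLoop, afdDelta, hd]
    · cases rest with
      | nil => simp [afdLoop, hc]
      | cons d rest' => simp [afdLoop, hc]

-- ===== VERDICT =====
theorem afd_parentesis_final_spec : Claim_equal_afd_parentesis_final := by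
  intro cadena _
  unfold Spec_afd_parentesis_final
  exact afd_eq cadena
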